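-- pv_equiv track=rewrite | github.com/GregWatson/Advent_of_code_2023 | Puzzle_12/puzzle.py | get_sequence_from_good_string
-- ===== SOURCE A (Python) =====
-- def get_sequence_from_good_string(s):
--     seq  = 0
--     count = 0
--     for c in s:
--         if c == '#': count = count+1
--         else:
--             if count != 0: seq = seq * 100 + count
--             count = 0
--     if count != 0: seq = seq * 100 + count
--     return seq
-- ===== SOURCE B (Python) =====
-- import re
--
-- def get_sequence_from_good_string(s):
--     seq = 0
--     for run in re.findall(r'#+', s):
--         seq = seq * 100 + len(run)
--     return seq
-- ===== Notes on version B (the rewrite author's own statement) =====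
-- stated objective: idiomatic
-- what changed: Replaces the per-character state machine carrying (seq, count) with a regex findall that collects the maximal hash-runs first and then folds their lengths into the packed integer.
import Mathlib
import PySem

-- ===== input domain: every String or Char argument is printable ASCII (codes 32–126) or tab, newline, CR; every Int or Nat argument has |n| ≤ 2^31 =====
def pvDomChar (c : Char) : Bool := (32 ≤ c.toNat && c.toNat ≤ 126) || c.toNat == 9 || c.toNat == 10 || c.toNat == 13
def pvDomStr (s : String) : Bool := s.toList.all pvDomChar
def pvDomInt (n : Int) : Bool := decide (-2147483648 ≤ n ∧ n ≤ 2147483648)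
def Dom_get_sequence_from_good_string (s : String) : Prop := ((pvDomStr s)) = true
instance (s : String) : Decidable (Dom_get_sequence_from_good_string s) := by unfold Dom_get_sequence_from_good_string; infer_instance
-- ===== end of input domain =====

-- B replaces A's per-character (seq, count) state machine with a two-pass form:
-- collect the maximal '#' runs first (re.findall(r'#+', s)), then fold their lengths. Objective: idiomatic.

-- ===== PORT A =====
-- A's loop over the characters, carrying (seq, count); the trailing 'if count != 0' is the [] case.
def pvLoopA : List Char → Int → Int → Int
  | [], seq, count => if count ≠ 0 then seq * 100 + count else seq
  | c :: cs, seq, count =>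
      if c = '#' then pvLoopA cs seq (count + 1)
      else pvLoopA cs (if count ≠ 0 then seq * 100 + count else seq) 0

def get_sequence_from_good_string (s : String) : Int := pvLoopA s.toList 0 0

-- ===== PORT B =====
-- re.findall(r'#+', s) returns the maximal runs of '#'; pvHashRuns returns their lengths
-- (hand-ported regex scan: take a maximal run with takeWhile, skip past it with dropWhile).
def pvHashRuns : List Char → List Int
  | [] => []
  | c :: cs =>
      if c = '#' then
        ((cs.takeWhile (· = '#')).length + 1 : Int) :: pvHashRuns (cs.dropWhile (· = '#'))
      else pvHashRuns cs
termination_by l => l.length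
decreasing_by
  · exact Nat.lt_succ_of_le (List.length_dropWhile_le _ _)
  · exact Nat.lt_succ_self _

def get_sequence_from_good_string_alt (s : String) : Int :=
  (pvHashRuns s.toList).foldl (fun seq k => seq * 100 + k) 0

-- ===== PRECONDITION & SPEC =====
def Spec_get_sequence_from_good_string (s : String) (out : Int) : Prop := out = get_sequence_from_good_string_alt s
instance (s : String) (out : Int) : Decidable (Spec_get_sequence_from_good_string s out) := by unfold Spec_get_sequence_from_good_string; infer_instance

-- ===== CLAIM (what is proved, stated in full; the proofs are below) =====
def Claim_equal_get_sequence_from_good_string : Prop := ∀ (s : String), Dom_get_sequence_from_good_string s → Spec_get_sequence_from_good_string s (get_sequence_from_good_string s)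

-- ===== LEMMAS AND PROOFS =====

-- run lengths of l assuming `count` pending '#'s already seen (the invariant bridging the two shapes)
def pvRunsC (count : Int) : List Char → List Int
  | [] => if count ≠ 0 then [count] else []
  | c :: cs =>
      if c = '#' then pvRunsC (count + 1) cs
      else if count ≠ 0 then count :: pvRunsC 0 cs else pvRunsC 0 cs

theorem pvLoopA_eq_foldl (l : List Char) :
    ∀ (seq count : Int), pvLoopA l seq count = (pvRunsC count l).foldl (fun a k => a * 100 + k) seq := by
  induction l with
  | nil => intro seq count; by_cases h : count ≠ 0 <;> simp [pvLoopA, pvRunsC, h]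
  | cons c cs ih =>
      intro seq count
      by_cases hc : c = '#'
      · simp [pvLoopA, pvRunsC, hc, ih]
      · by_cases h : count ≠ 0 <;> simp [pvLoopA, pvRunsC, hc, h, ih]

theorem pvRunsC_pos (cs : List Char) :
    ∀ (count : Int), 0 < count →
      pvRunsC count cs = (count + ((cs.takeWhile (· = '#')).length : Int)) :: pvRunsC 0 (cs.dropWhile (· = '#')) := by
  induction cs with
  | nil => intro count h; simp [pvRunsC, h.ne']
  | cons c cs ih =>
      intro count h
      by_cases hc : c = '#'
      · rw [pvRunsC, if_pos hc, ih (count + 1) (by omega)]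
        simp [hc, List.takeWhile, List.dropWhile]
        ring
      · simp [pvRunsC, hc, h.ne', List.takeWhile, List.dropWhile]

theorem pvRunsC_zero (l : List Char) : pvRunsC 0 l = pvHashRuns l := by
  induction l using pvHashRuns.induct with
  | case1 => simp [pvRunsC, pvHashRuns]
  | case2 cs ih =>
      rw [pvRunsC, if_pos rfl, zero_add, pvRunsC_pos cs 1 one_pos, ih, pvHashRuns, if_pos rfl]
      simp [add_comm]
  | case3 c cs hc ih => simp [pvRunsC, pvHashRuns, hc, ih]

-- ===== VERDICT (by name: the statement is the Claim_ definition above) =====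
theorem get_sequence_from_good_string_spec : Claim_equal_get_sequence_from_good_string := by
  intro s _
  unfold Spec_get_sequence_from_good_string get_sequence_from_good_string get_sequence_from_good_string_alt
  rw [pvLoopA_eq_foldl, pvRunsC_zero]
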